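-- pv_equiv track=rewrite | github.com/HammerOfSteel/Astral-Automation | iching_base.py | determine_hexagram
-- ===== SOURCE A (Python) =====
-- def determine_hexagram(flips):
--     """
--     Determine the hexagram based on the coin flips.
--     Each flip total determines the type of line in the hexagram (6, 7, 8, 9).
--     """
--     hexagram_lines = []
--
--     for flip in flips:
--         if flip == 6:
--             hexagram_lines.append('--- x ---')  # Old Yin
--         elif flip == 7:
--             hexagram_lines.append('---------')  # Young Yang
--         elif flip == 8:
--             hexagram_lines.append('---   ---')  # Young Yin
--         elif flip == 9:
--             hexagram_lines.append('--- o ---')  # Old Yang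
--
--     hexagram_number = calculate_hexagram_number(hexagram_lines)
--     return hexagram_number, hexagram_lines
--
-- def calculate_hexagram_number(lines):
--     """
--     Calculate the hexagram number based on its lines.
--     Each line is converted to a binary digit (0 for Yin, 1 for Yang),
--     and the resulting binary number is converted to decimal.
--     """
--     binary = ''.join(['0' if 'x' in line or ' ' in line else '1' for line in lines])
--     return int(binary, 2)
-- ===== SOURCE B (Python) =====
-- _TABLE = {
--     6: ('--- x ---', 0),  # Old Yin
--     7: ('---------', 1),  # Young Yang
--     8: ('---   ---', 0),  # Young Yin
--     9: ('--- o ---', 0),  # Old Yang ('0' per A's substring rule: the line contains spaces)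
-- }
--
-- def determine_hexagram(flips):
--     """Single pass: a lookup table gives each flip its line and its binary digit;
--     the hexagram number is accumulated arithmetically (n = n*2 + bit), so no
--     binary string is built and no second pass over the lines is needed."""
--     number = 0
--     lines = []
--     for flip in flips:
--         entry = _TABLE.get(flip)
--         if entry is not None:
--             line, bit = entry
--             lines.append(line)
--             number = number * 2 + bit
--     return number, lines
-- ===== Notes on version B (the rewrite author's own statement) =====
-- stated objective: simpler
-- what changed: One table-driven pass accumulates the hexagram number arithmetically (n = n*2 + bit) alongside the lines, replacing A's two-phase build-lines / substring-test-per-line / join-binary-string / int(s,2) pipeline.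
-- outside the precondition, e.g. on determine_hexagram([]): A raises ValueError, B returns (0, []); on determine_hexagram([5]): A raises ValueError, B returns (0, [])
-- crash fix: On inputs containing no recognized flip (no 6, 7, 8 or 9, e.g. the empty list) A raises ValueError via int('', 2); B returns (0, []). — e.g. on determine_hexagram([5]): A raises ValueError, B returns (0, [])
import Mathlib
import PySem

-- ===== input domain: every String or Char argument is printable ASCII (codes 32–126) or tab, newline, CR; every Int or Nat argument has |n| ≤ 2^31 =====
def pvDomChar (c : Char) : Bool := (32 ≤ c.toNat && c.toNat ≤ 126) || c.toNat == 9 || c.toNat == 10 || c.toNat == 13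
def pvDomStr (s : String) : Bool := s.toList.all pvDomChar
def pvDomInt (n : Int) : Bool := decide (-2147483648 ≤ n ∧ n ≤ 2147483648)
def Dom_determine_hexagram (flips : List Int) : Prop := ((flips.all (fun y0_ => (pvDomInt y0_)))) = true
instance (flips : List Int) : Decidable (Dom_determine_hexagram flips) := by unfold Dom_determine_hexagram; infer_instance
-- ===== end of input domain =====

-- B replaces A's two-phase pipeline (build lines, substring-test each line, join a binary
-- string, int(s,2)) by one table-driven pass that accumulates the number arithmetically.

-- ===== PORT A =====
-- the loop body of A: one append per recognized flip, branches in A's order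
def aLineStep (acc : List String) (flip : Int) : List String :=
  if flip = 6 then acc ++ ["--- x ---"]
  else if flip = 7 then acc ++ ["---------"]
  else if flip = 8 then acc ++ ["---   ---"]
  else if flip = 9 then acc ++ ["--- o ---"]
  else acc

-- '0' if 'x' in line or ' ' in line else '1'
def aBinChar (line : String) : Char :=
  if line.toList.contains 'x' || line.toList.contains ' ' then '0' else '1'

-- hand port of int(s, 2): exact for strings of '0'/'1' characters (the only strings A builds);
-- none on the empty string = Python's ValueError
def int2? (s : List Char) : Option Int :=
  if s = [] then none
  else some (s.foldl (fun n c => n * 2 + (if c = '1' then 1 else 0)) 0)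

def calculate_hexagram_number (lines : List String) : Option Int :=
  int2? (lines.map aBinChar)

def determine_hexagram (flips : List Int) : Int × List String :=
  let lines := flips.foldl aLineStep []
  -- .getD 0 is reached only outside Pre_, where the Python raises ValueError
  ((calculate_hexagram_number lines).getD 0, lines)

-- ===== PORT B =====
def bTable : PySem.Dict Int (String × Int) :=
  PySem.Dict.ofList [(6, ("--- x ---", 0)), (7, ("---------", 1)), (8, ("---   ---", 0)), (9, ("--- o ---", 0))]

def bStep (st : Int × List String) (flip : Int) : Int × List String :=
  match PySem.Dict.get? bTable flip with
  | some (line, bit) => (st.1 * 2 + bit, st.2 ++ [line])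
  | none => st

def determine_hexagram_alt (flips : List Int) : Int × List String :=
  flips.foldl bStep (0, [])

-- ===== PRECONDITION & SPEC =====
-- Pre_ excludes exactly the inputs with no recognized flip, on which A raises ValueError (int('', 2)).
def Pre_determine_hexagram (flips : List Int) : Prop :=
  ∃ f ∈ flips, f = 6 ∨ f = 7 ∨ f = 8 ∨ f = 9
instance (flips : List Int) : Decidable (Pre_determine_hexagram flips) := by
  unfold Pre_determine_hexagram; infer_instance
def pvWitness_determine_hexagram : List Int := [7, 8, 6, 9, 7, 5]

-- On inputs containing no recognized flip (no 6, 7, 8 or 9) A raises ValueError via int('', 2); B returns (0, []).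
def Raises_determine_hexagram (flips : List Int) : Prop :=
  ∀ f ∈ flips, ¬(f = 6 ∨ f = 7 ∨ f = 8 ∨ f = 9)
instance (flips : List Int) : Decidable (Raises_determine_hexagram flips) := by
  unfold Raises_determine_hexagram; infer_instance
def pvRaiseWitness_determine_hexagram : List Int := [5]
def pvRaiseWitnessOut_determine_hexagram : Int × List String := (0, [])

def Spec_determine_hexagram (flips : List Int) (out : Int × List String) : Prop := out = determine_hexagram_alt flips
instance (flips : List Int) (out : Int × List String) : Decidable (Spec_determine_hexagram flips out) := by unfold Spec_determine_hexagram; infer_instance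

-- ===== CLAIM (what is proved, stated in full; the proofs are below) =====
def Claim_equal_determine_hexagram : Prop := ∀ (flips : List Int), Dom_determine_hexagram flips → Pre_determine_hexagram flips → Spec_determine_hexagram flips (determine_hexagram flips)

def Claim_raises_determine_hexagram : Prop := (∀ (flips : List Int), Dom_determine_hexagram flips → Raises_determine_hexagram flips → ¬ Pre_determine_hexagram flips) ∧ (Dom_determine_hexagram (pvRaiseWitness_determine_hexagram) ∧ Raises_determine_hexagram (pvRaiseWitness_determine_hexagram) ∧ determine_hexagram_alt (pvRaiseWitness_determine_hexagram) = pvRaiseWitnessOut_determine_hexagram)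

-- ===== LEMMAS AND PROOFS =====

-- each flip's contribution to the line list, as a (possibly empty) segment
def lineOf (flip : Int) : List String :=
  if flip = 6 then ["--- x ---"]
  else if flip = 7 then ["---------"]
  else if flip = 8 then ["---   ---"]
  else if flip = 9 then ["--- o ---"]
  else []

def bitStep (n : Int) (c : Char) : Int := n * 2 + (if c = '1' then 1 else 0)

theorem lines_eq_flatMap (flips : List Int) (acc : List String) :
    flips.foldl aLineStep acc = acc ++ flips.flatMap lineOf := by
  have h : aLineStep = fun acc f => acc ++ lineOf f := by
    funext a f
    simp only [aLineStep, lineOf]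
    split_ifs <;> simp
  rw [h, PySem.List.foldl_append_eq_flatMap]

theorem step_eq (n : Int) (ls : List String) (f : Int) :
    bStep (n, ls) f = (((lineOf f).map aBinChar).foldl bitStep n, ls ++ lineOf f) := by
  by_cases h6 : f = 6
  · subst h6
    have h : bTable.get? 6 = some ("--- x ---", 0) := by decide
    simp [bStep, h, lineOf, aBinChar, bitStep]
  by_cases h7 : f = 7
  · subst h7
    have h : bTable.get? 7 = some ("---------", 1) := by decide
    simp [bStep, h, lineOf, aBinChar, bitStep]
  by_cases h8 : f = 8
  · subst h8
    have h : bTable.get? 8 = some ("---   ---", 0) := by decide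
    simp [bStep, h, lineOf, aBinChar, bitStep]
  by_cases h9 : f = 9
  · subst h9
    have h : bTable.get? 9 = some ("--- o ---", 0) := by decide
    simp [bStep, h, lineOf, aBinChar, bitStep]
  · have hmk : bTable = PySem.Dict.mk [(6, ("--- x ---", 0)), (7, ("---------", 1)),
        (8, ("---   ---", 0)), (9, ("--- o ---", 0))] := by decide
    have h : bTable.get? f = none := by
      simp [hmk, Ne.symm h6, Ne.symm h7, Ne.symm h8, Ne.symm h9, PySem.Dict.get?]
    simp [bStep, h, lineOf, h6, h7, h8, h9]

theorem bfold_eq (flips : List Int) : ∀ (n : Int) (ls : List String),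
    flips.foldl bStep (n, ls) =
      (((flips.flatMap lineOf).map aBinChar).foldl bitStep n, ls ++ flips.flatMap lineOf) := by
  induction flips with
  | nil => intro n ls; simp
  | cons f rest ih =>
    intro n ls
    simp only [List.foldl_cons, List.flatMap_cons, List.map_append, List.foldl_append,
      step_eq, ih, List.append_assoc]

theorem int2_getD (cs : List Char) :
    (int2? cs).getD 0 = cs.foldl bitStep 0 := by
  simp only [int2?]
  split
  · simp_all
  · rfl

-- ===== VERDICT (by name: the statement is the Claim_ definition above) =====
theorem determine_hexagram_spec : Claim_equal_determine_hexagram := by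
  intro flips _ _
  unfold Spec_determine_hexagram determine_hexagram determine_hexagram_alt calculate_hexagram_number
  simp only [lines_eq_flatMap, bfold_eq, int2_getD, List.nil_append]

@[simp] theorem determine_hexagram_raises : Claim_raises_determine_hexagram := by
  unfold Claim_raises_determine_hexagram
  constructor
  · intro flips _ hr hp
    obtain ⟨f, hf, hc⟩ := hp
    exact hr f hf hc
  · exact ⟨by decide, by decide, by decide⟩
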